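-- pv_equiv track=rewrite | github.com/malikovmik/software | lab_6/pythonProject/lab_6_4.py | friend
-- ===== SOURCE A (Python) =====
-- def friend(tuple_some, value):
--     if value not in tuple_some:
--         return ()
--     else:
--         for elem in tuple_some:
--             if elem == value:
--                 index = tuple_some.index(value)
--                 sub_tuple = tuple_some[index:]
--                 slice_tuple = sub_tuple[1:]
--                 if value in slice_tuple:
--                     index_slice = slice_tuple.index(value)
--                     sub_sub = slice_tuple[:index_slice]
--                     list1 = [value] + list(sub_sub) + [value]
--                     new_tuple = tuple(list1)
--                     return new_tuple
--                 else:
--                     return sub_tuple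
-- ===== SOURCE B (Python) =====
-- def friend(tuple_some, value):
--     it = iter(tuple_some)
--     for x in it:
--         if x == value:
--             break
--     else:
--         return ()
--     out = [value]
--     for x in it:
--         out.append(x)
--         if x == value:
--             break
--     return tuple(out)
-- ===== Notes on version B (the rewrite author's own statement) =====
-- stated objective: simpler
-- what changed: Replaces A's membership test, first-index lookup, slicing and a rescan for the second occurrence with a single forward pass over one shared iterator: skip to the first occurrence, then accumulate elements until the second occurrence (or the end) and return the accumulator; no index/slice operations at all.
import Mathlib
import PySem

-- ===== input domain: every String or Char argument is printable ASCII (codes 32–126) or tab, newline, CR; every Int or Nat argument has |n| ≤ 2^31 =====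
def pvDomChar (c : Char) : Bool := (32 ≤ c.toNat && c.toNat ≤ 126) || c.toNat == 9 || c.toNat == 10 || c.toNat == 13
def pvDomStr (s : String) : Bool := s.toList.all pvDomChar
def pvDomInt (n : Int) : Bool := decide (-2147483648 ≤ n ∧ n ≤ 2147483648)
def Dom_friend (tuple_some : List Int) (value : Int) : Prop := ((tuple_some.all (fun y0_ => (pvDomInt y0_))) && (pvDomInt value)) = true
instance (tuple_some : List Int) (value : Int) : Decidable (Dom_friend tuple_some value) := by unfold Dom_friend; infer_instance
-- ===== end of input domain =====

-- B replaces A's membership test + index/slice/rescan chain with a single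
-- forward pass over one shared iterator: skip to the first occurrence, then
-- collect elements until the second occurrence or the end (objective: simpler).


-- ===== PORT A =====
-- the 'for elem in tuple_some' loop: the body fires (and returns) at the first elem == value;
-- the [] case is Python falling off the loop, unreachable since friend checks membership first
def friendLoop (tuple_some : List Int) (value : Int) : List Int → List Int
  | [] => []
  | elem :: rest =>
    if elem = value then
      let index : Int := ((PySem.List.index? tuple_some value).getD 0 : Nat)
      let sub_tuple := PySem.List.slice tuple_some (some index) none
      let slice_tuple := PySem.List.slice sub_tuple (some 1) none
      if value ∈ slice_tuple then
        let index_slice : Int := ((PySem.List.index? slice_tuple value).getD 0 : Nat)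
        let sub_sub := PySem.List.slice slice_tuple none (some index_slice)
        [value] ++ sub_sub ++ [value]
      else sub_tuple
    else friendLoop tuple_some value rest

def friend (tuple_some : List Int) (value : Int) : List Int :=
  if value ∈ tuple_some then friendLoop tuple_some value tuple_some else []

-- ===== PORT B =====
-- Source B's first for-loop over the iterator: advance past the first occurrence of v,
-- returning the unconsumed remainder of the iterator; none = the for-else 'return ()'
def skipToFirst (v : Int) : List Int → Option (List Int)
  | [] => none
  | x :: rest => if x = v then some rest else skipToFirst v rest

-- Source B's second for-loop: append each element to out, stopping after the next occurrence of v
def collectUntil (v : Int) : List Int → List Int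
  | [] => []
  | x :: rest => if x = v then [x] else x :: collectUntil v rest

def friend_alt (tuple_some : List Int) (value : Int) : List Int :=
  match skipToFirst value tuple_some with
  | none => []
  | some rest => value :: collectUntil value rest

-- ===== PRECONDITION & SPEC =====
def Spec_friend (tuple_some : List Int) (value : Int) (out : List Int) : Prop := out = friend_alt tuple_some value
instance (tuple_some : List Int) (value : Int) (out : List Int) : Decidable (Spec_friend tuple_some value out) := by unfold Spec_friend; infer_instance

-- ===== CLAIM (what is proved, stated in full; the proofs are below) =====
def Claim_equal_friend : Prop := ∀ (tuple_some : List Int) (value : Int), Dom_friend tuple_some value → Spec_friend tuple_some value (friend tuple_some value)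

-- ===== LEMMAS AND PROOFS =====

-- the loop fires at the first matching element; its result does not depend on the rest of the list
lemma friendLoop_fires (ts : List Int) (v : Int) : ∀ l : List Int, v ∈ l → friendLoop ts v l = friendLoop ts v [v] := by
  intro l hl
  induction l with
  | nil => simp at hl
  | cons e rest ih =>
    by_cases h : e = v
    · subst h; simp [friendLoop]
    · rw [show friendLoop ts v (e :: rest) = friendLoop ts v rest by simp [friendLoop, h]]
      exact ih (by rcases List.mem_cons.mp hl with rfl | hm; exact absurd rfl h; exact hm)

-- the part of A's body downstream of sub_tuple
def tailPart (value : Int) (st : List Int) : List Int :=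
  let slice_tuple := PySem.List.slice st (some 1) none
  if value ∈ slice_tuple then
    let index_slice : Int := ((PySem.List.index? slice_tuple value).getD 0 : Nat)
    let sub_sub := PySem.List.slice slice_tuple none (some index_slice)
    [value] ++ sub_sub ++ [value]
  else st

lemma friendLoop_single (ts : List Int) (v : Int) :
    friendLoop ts v [v] = tailPart v (PySem.List.slice ts (some (((PySem.List.index? ts v).getD 0 : Nat) : Int)) none) := by
  simp [friendLoop, tailPart]

lemma slice_from_nat (ts : List Int) (i : Nat) :
    PySem.List.slice ts (some (i : Int)) none = ts.drop i := by
  rw [PySem.List.slice_from ts (by positivity)]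
  simp

lemma slice_one (a : Int) (ts : List Int) : PySem.List.slice (a :: ts) (some 1) none = ts := by
  rw [show (1 : Int) = ((1 : Nat) : Int) by norm_num, slice_from_nat]
  rfl

lemma skipToFirst_none (v : Int) (ts : List Int) (hv : v ∉ ts) : skipToFirst v ts = none := by
  induction ts with
  | nil => rfl
  | cons a ts ih =>
    have ha : a ≠ v := fun h => hv (by simp [h.symm])
    rw [skipToFirst, if_neg ha]
    exact ih (fun h => hv (List.mem_cons_of_mem _ h))

lemma skipToFirst_spec (v : Int) (ts : List Int) :
    ∀ i : Nat, PySem.List.index? ts v = some i → skipToFirst v ts = some (ts.drop (i + 1)) := by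
  induction ts with
  | nil => intro i h; simp [PySem.List.index?] at h
  | cons a ts ih =>
    intro i h
    by_cases ha : a = v
    · subst ha
      rw [PySem.List.index?_cons_self] at h
      cases h
      simp [skipToFirst]
    · rw [PySem.List.index?_cons_of_ne ts ha] at h
      cases hrec : PySem.List.index? ts v with
      | none => rw [hrec] at h; simp at h
      | some j =>
        rw [hrec] at h
        simp at h
        rw [skipToFirst, if_neg ha, ih j hrec, ← h]
        simp
  
lemma collectUntil_notmem (v : Int) (ts : List Int) (hv : v ∉ ts) : collectUntil v ts = ts := by
  induction ts with
  | nil => rfl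
  | cons a ts ih =>
    have ha : a ≠ v := fun h => hv (by simp [h.symm])
    rw [collectUntil, if_neg ha, ih (fun h => hv (List.mem_cons_of_mem _ h))]

lemma collectUntil_spec (v : Int) (ts : List Int) :
    ∀ j : Nat, PySem.List.index? ts v = some j → collectUntil v ts = ts.take j ++ [v] := by
  induction ts with
  | nil => intro j h; simp [PySem.List.index?] at h
  | cons a ts ih =>
    intro j h
    by_cases ha : a = v
    · subst ha
      rw [PySem.List.index?_cons_self] at h
      cases h
      simp [collectUntil]
    · rw [PySem.List.index?_cons_of_ne ts ha] at h
      cases hrec : PySem.List.index? ts v with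
      | none => rw [hrec] at h; simp at h
      | some k =>
        rw [hrec] at h
        simp at h
        rw [collectUntil, if_neg ha, ih k hrec, ← h]
        simp

lemma main_equiv (v : Int) (ts : List Int) : friend ts v = friend_alt ts v := by
  by_cases hv : v ∈ ts
  · obtain ⟨i, hidx⟩ := Option.isSome_iff_exists.mp ((PySem.List.index?_isSome_iff ts v).mpr hv)
    obtain ⟨hk, hget, _⟩ := PySem.List.getElem_of_index?_eq_some hidx
    have hdrop : ts.drop i = v :: ts.drop (i + 1) := by
      rw [List.drop_eq_getElem_cons hk, hget]
    rw [friend, if_pos hv, friendLoop_fires _ _ _ hv, friendLoop_single, hidx,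
        Option.getD_some, slice_from_nat, hdrop]
    rw [friend_alt, skipToFirst_spec v ts i hidx]
    dsimp only
    rw [tailPart, slice_one]
    by_cases hv2 : v ∈ ts.drop (i + 1)
    · obtain ⟨j, hidx2⟩ := Option.isSome_iff_exists.mp ((PySem.List.index?_isSome_iff _ v).mpr hv2)
      rw [if_pos hv2, hidx2, Option.getD_some]
      dsimp only
      rw [PySem.List.slice_to _ (Int.natCast_nonneg j), Int.toNat_natCast,
          collectUntil_spec v _ j hidx2]
      simp
    · rw [if_neg hv2, collectUntil_notmem v _ hv2]
  · rw [friend, if_neg hv, friend_alt, skipToFirst_none v ts hv]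

-- ===== VERDICT (by name: the statement is the Claim_ definition above) =====
theorem friend_spec : Claim_equal_friend := by
  intro ts v _
  unfold Spec_friend
  exact main_equiv v ts
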